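-- pv_equiv track=rewrite | github.com/Alittlebitofme/Crackers-Toolkit | crackers_toolkit/modules/mask_builder.py | _count_effective_chars
-- ===== SOURCE A (Python) =====
-- PLACEHOLDERS = {
--     "?l": ("a-z", 26),
--     "?u": ("A-Z", 26),
--     "?d": ("0-9", 10),
--     "?h": ("0-9 a-f", 16),
--     "?H": ("0-9 A-F", 16),
--     "?s": ("Special chars", 33),
--     "?a": ("All printable ASCII", 95),
--     "?b": ("All bytes 0x00-0xFF", 256),
--     "?1": ("Custom charset 1", 0),
--     "?2": ("Custom charset 2", 0),
--     "?3": ("Custom charset 3", 0),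
--     "?4": ("Custom charset 4", 0),
--     "?5": ("Custom charset 5", 0),
--     "?6": ("Custom charset 6", 0),
--     "?7": ("Custom charset 7", 0),
--     "?8": ("Custom charset 8", 0),
-- }
--
-- def _count_effective_chars(charset_str: str) -> int:
--     """Count effective characters from a charset string that may include
--     placeholders like ``?l?d``."""
--     count = 0
--     i = 0
--     while i < len(charset_str):
--         if i + 1 < len(charset_str) and charset_str[i] == "?":
--             token = charset_str[i : i + 2]
--             if token in PLACEHOLDERS:
--                 count += PLACEHOLDERS[token][1]
--                 i += 2
--                 continue
--         count += 1
--         i += 1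
--     return count
-- ===== SOURCE B (Python) =====
-- SIZES = {
--     "l": 26, "u": 26, "d": 10, "h": 16, "H": 16,
--     "s": 33, "a": 95, "b": 256,
--     "1": 0, "2": 0, "3": 0, "4": 0, "5": 0, "6": 0, "7": 0, "8": 0,
-- }
--
--
-- def _count_effective_chars(charset_str: str) -> int:
--     # One pass with a pending question-mark flag: every raw char contributes 1 (via len),
--     # and a valid placeholder suffix right after an unconsumed '?' replaces the
--     # pair's 2 raw chars by the tabulated size.
--     total = len(charset_str)
--     pending = False
--     for ch in charset_str:
--         if pending and ch in SIZES:
--             total += SIZES[ch] - 2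
--             pending = False
--         else:
--             pending = ch == "?"
--     return total
-- ===== Notes on version B (the rewrite author's own statement) =====
-- stated objective: faster
-- what changed: Replaces the index-pointer two-char-token state machine over PLACEHOLDERS with a single fold carrying a pending question-mark boolean flag over a suffix-keyed size table, adding size-2 per matched suffix on top of len(s); faster by avoiding per-step slicing and two-char dict keys.
import Mathlib
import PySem

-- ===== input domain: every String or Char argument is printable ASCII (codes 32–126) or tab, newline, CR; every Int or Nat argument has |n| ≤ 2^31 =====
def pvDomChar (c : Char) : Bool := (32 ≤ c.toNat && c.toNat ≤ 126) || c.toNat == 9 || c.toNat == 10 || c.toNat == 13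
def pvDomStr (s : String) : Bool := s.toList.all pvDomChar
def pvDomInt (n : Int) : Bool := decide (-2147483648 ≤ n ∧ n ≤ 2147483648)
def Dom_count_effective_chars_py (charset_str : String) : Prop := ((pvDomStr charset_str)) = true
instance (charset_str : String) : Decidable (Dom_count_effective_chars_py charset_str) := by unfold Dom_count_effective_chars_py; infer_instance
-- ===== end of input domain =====

-- B replaces A's two-char-token index state machine by a single fold carrying a pending question-mark flag over a suffix-keyed size table (measured faster at a timing run's sizes).

-- ===== PORT A =====
-- module-level constant PLACEHOLDERS (keys kept as their character lists; a 2-char Python str key ≅ List Char)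
def PLACEHOLDERS_py : PySem.Dict (List Char) (String × Int) :=
  ⟨[ (['?','l'], ("a-z", 26)),
     (['?','u'], ("A-Z", 26)),
     (['?','d'], ("0-9", 10)),
     (['?','h'], ("0-9 a-f", 16)),
     (['?','H'], ("0-9 A-F", 16)),
     (['?','s'], ("Special chars", 33)),
     (['?','a'], ("All printable ASCII", 95)),
     (['?','b'], ("All bytes 0x00-0xFF", 256)),
     (['?','1'], ("Custom charset 1", 0)),
     (['?','2'], ("Custom charset 2", 0)),
     (['?','3'], ("Custom charset 3", 0)),
     (['?','4'], ("Custom charset 4", 0)),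
     (['?','5'], ("Custom charset 5", 0)),
     (['?','6'], ("Custom charset 6", 0)),
     (['?','7'], ("Custom charset 7", 0)),
     (['?','8'], ("Custom charset 8", 0)) ]⟩

-- A's while loop over index i, transcribed as structural recursion on the remaining characters;
-- 'i + 1 < len(charset_str)' = the rest has a second character; token = the next two characters.
def countLoopA : List Char → Int → Int
  | [], count => count
  | c :: d :: rest', count =>
    if c = '?' then
      match PySem.Dict.get? PLACEHOLDERS_py [c, d] with
      | some v => countLoopA rest' (count + v.2)
      | none => countLoopA (d :: rest') (count + 1)
    else countLoopA (d :: rest') (count + 1)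
  | _ :: [], count => count + 1
  termination_by l _ => l.length
  decreasing_by all_goals simp

def count_effective_chars_py (charset_str : String) : Int :=
  countLoopA charset_str.toList 0

-- ===== PORT B =====
-- Source B's module-level SIZES dict: placeholder suffix character -> tabulated size
def SIZES_py : PySem.Dict Char Int :=
  ⟨[ ('l', 26), ('u', 26), ('d', 10), ('h', 16), ('H', 16),
     ('s', 33), ('a', 95), ('b', 256),
     ('1', 0), ('2', 0), ('3', 0), ('4', 0), ('5', 0), ('6', 0), ('7', 0), ('8', 0) ]⟩

-- Source B's loop body: state = (total, pending); the membership test plus lookup = get?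
def stepB (st : Int × Bool) (ch : Char) : Int × Bool :=
  match st.2, SIZES_py.get? ch with
  | true, some n => (st.1 + (n - 2), false)
  | _, _ => (st.1, ch == '?')

-- Source B: total starts at len(charset_str); for ch in charset_str: stepB; return total
def count_effective_chars_py_alt (charset_str : String) : Int :=
  (charset_str.toList.foldl stepB ((PySem.Str.len charset_str : Int), false)).1

-- ===== PRECONDITION & SPEC =====
def Spec_count_effective_chars_py (charset_str : String) (out : Int) : Prop := out = count_effective_chars_py_alt charset_str
instance (charset_str : String) (out : Int) : Decidable (Spec_count_effective_chars_py charset_str out) := by unfold Spec_count_effective_chars_py; infer_instance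

-- ===== CLAIM (what is proved, stated in full; the proofs are below) =====
def Claim_equal_count_effective_chars_py : Prop := ∀ (charset_str : String), Dom_count_effective_chars_py charset_str → Spec_count_effective_chars_py charset_str (count_effective_chars_py charset_str)

-- ===== LEMMAS AND PROOFS =====

-- the two tables agree: looking up token ['?', d] in A's dict gives exactly B's size for suffix d
lemma tables_agree (d : Char) :
    (PySem.Dict.get? PLACEHOLDERS_py ['?', d]).map Prod.snd = SIZES_py.get? d := by
  by_cases h1 : d = 'l'; · subst h1; rfl
  by_cases h2 : d = 'u'; · subst h2; rfl
  by_cases h3 : d = 'd'; · subst h3; rfl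
  by_cases h4 : d = 'h'; · subst h4; rfl
  by_cases h5 : d = 'H'; · subst h5; rfl
  by_cases h6 : d = 's'; · subst h6; rfl
  by_cases h7 : d = 'a'; · subst h7; rfl
  by_cases h8 : d = 'b'; · subst h8; rfl
  by_cases h9 : d = '1'; · subst h9; rfl
  by_cases h10 : d = '2'; · subst h10; rfl
  by_cases h11 : d = '3'; · subst h11; rfl
  by_cases h12 : d = '4'; · subst h12; rfl
  by_cases h13 : d = '5'; · subst h13; rfl
  by_cases h14 : d = '6'; · subst h14; rfl
  by_cases h15 : d = '7'; · subst h15; rfl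
  by_cases h16 : d = '8'; · subst h16; rfl
  simp [PLACEHOLDERS_py, SIZES_py, PySem.Dict.get?, List.find?,
    show ('l' == d) = false from beq_eq_false_iff_ne.mpr (fun hx => h1 hx.symm),
    show ('u' == d) = false from beq_eq_false_iff_ne.mpr (fun hx => h2 hx.symm),
    show ('d' == d) = false from beq_eq_false_iff_ne.mpr (fun hx => h3 hx.symm),
    show ('h' == d) = false from beq_eq_false_iff_ne.mpr (fun hx => h4 hx.symm),
    show ('H' == d) = false from beq_eq_false_iff_ne.mpr (fun hx => h5 hx.symm),
    show ('s' == d) = false from beq_eq_false_iff_ne.mpr (fun hx => h6 hx.symm),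
    show ('a' == d) = false from beq_eq_false_iff_ne.mpr (fun hx => h7 hx.symm),
    show ('b' == d) = false from beq_eq_false_iff_ne.mpr (fun hx => h8 hx.symm),
    show ('1' == d) = false from beq_eq_false_iff_ne.mpr (fun hx => h9 hx.symm),
    show ('2' == d) = false from beq_eq_false_iff_ne.mpr (fun hx => h10 hx.symm),
    show ('3' == d) = false from beq_eq_false_iff_ne.mpr (fun hx => h11 hx.symm),
    show ('4' == d) = false from beq_eq_false_iff_ne.mpr (fun hx => h12 hx.symm),
    show ('5' == d) = false from beq_eq_false_iff_ne.mpr (fun hx => h13 hx.symm),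
    show ('6' == d) = false from beq_eq_false_iff_ne.mpr (fun hx => h14 hx.symm),
    show ('7' == d) = false from beq_eq_false_iff_ne.mpr (fun hx => h15 hx.symm),
    show ('8' == d) = false from beq_eq_false_iff_ne.mpr (fun hx => h16 hx.symm)]

-- the fold's total is additive in its starting total, and its pending flag does not depend on it
lemma foldB_shift (l : List Char) (t x : Int) (b : Bool) :
    l.foldl stepB (t + x, b) =
      ((l.foldl stepB (x, b)).1 + t, (l.foldl stepB (x, b)).2) := by
  induction l generalizing x b with
  | nil => simp; ring
  | cons c rest ih =>
    simp only [List.foldl_cons]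
    rcases b with _ | _
    · simp only [stepB]; exact ih x _
    · cases hg : SIZES_py.get? c with
      | none => simp only [stepB, hg]; exact ih x _
      | some n =>
        simp only [stepB, hg]
        have h2 := ih (x + (n - 2)) false
        rw [show t + x + (n - 2) = t + (x + (n - 2)) by ring]
        exact h2

-- B's fold result from a clean (total 0, pending false) start
def gB (l : List Char) : Int := (l.foldl stepB (0, false)).1

lemma gB_shift (l : List Char) (t : Int) : (l.foldl stepB (t, false)).1 = t + gB l := by
  have := foldB_shift l t 0 false
  rw [show t + (0 : Int) = t by ring] at this
  rw [this, gB]; ring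

-- main invariant: A's loop from accumulator acc equals acc + length + B's clean fold total
lemma countLoopA_eq (l : List Char) (acc0 : Int) :
    countLoopA l acc0 = acc0 + l.length + gB l := by
  induction l, acc0 using countLoopA.induct with
  | case1 count => simp [countLoopA, gB]
  | case2 d rest' count v hv ih =>
    have hs : SIZES_py.get? d = some v.2 := by
      rw [← tables_agree, hv]; rfl
    rw [show countLoopA ('?' :: d :: rest') count = countLoopA rest' (count + v.2) from by
      simp [countLoopA, hv], ih]
    have hg : gB ('?' :: d :: rest') = (v.2 - 2) + gB rest' := by
      simp only [gB, List.foldl_cons]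
      rw [show stepB (0, false) '?' = (0, true) from rfl,
        show stepB (0, true) d = (0 + (v.2 - 2), false) from by simp [stepB, hs],
        show (0 : Int) + (v.2 - 2) = v.2 - 2 by ring, gB_shift]
      rfl
    rw [hg]
    simp only [List.length_cons]
    push_cast; ring
  | case3 d rest' count hv ih =>
    have hs : SIZES_py.get? d = none := by
      rw [← tables_agree, hv]; rfl
    rw [show countLoopA ('?' :: d :: rest') count = countLoopA (d :: rest') (count + 1) from by
      simp [countLoopA, hv], ih]
    have hg : gB ('?' :: d :: rest') = gB (d :: rest') := by
      simp only [gB, List.foldl_cons]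
      rw [show stepB (0, false) '?' = (0, true) from rfl,
        show stepB (0, true) d = (0, d == '?') from by simp [stepB, hs],
        show stepB (0, false) d = (0, d == '?') from by
          cases h : SIZES_py.get? d <;> simp [stepB]]
    rw [hg]
    simp only [List.length_cons]
    push_cast; ring
  | case4 c d rest' count hc ih =>
    rw [show countLoopA (c :: d :: rest') count = countLoopA (d :: rest') (count + 1) from by
      simp [countLoopA, hc], ih]
    have hg : gB (c :: d :: rest') = gB (d :: rest') := by
      simp only [gB, List.foldl_cons]
      rw [show stepB (0, false) c = (0, false) from by
        cases h : SIZES_py.get? c <;> simp [stepB, beq_eq_false_iff_ne.mpr hc]]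
    rw [hg]
    simp only [List.length_cons]
    push_cast; ring
  | case5 head count =>
    simp only [countLoopA]
    have hg : gB [head] = 0 := by
      cases hs : SIZES_py.get? head <;> simp [gB, stepB]
    rw [hg]
    simp

-- ===== VERDICT (by name: the statement is the Claim_ definition above) =====
theorem count_effective_chars_py_spec : Claim_equal_count_effective_chars_py := by
  intro s _
  show _ = _
  rw [count_effective_chars_py, countLoopA_eq, count_effective_chars_py_alt,
    gB_shift, PySem.Str.len_eq]
  ring
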